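-- pv_equiv track=rewrite | github.com/BkCloudOps/cert-automation | certificate_automation.py | is_covered_by_wildcard
-- ===== SOURCE A (Python) =====
-- from typing import List, Dict, Any, Tuple
--
-- def get_wildcard_patterns(dns_name: str) -> List[str]:
--     """
--     Generate wildcard patterns for a DNS name.
--     For example: 'pie-alicloud-chargeback.platform-scope.pod.cac.corp.aks.sunlife.com'
--     Returns: ['*.platform-scope.pod.cac.corp.aks.sunlife.com', '*.pod.cac.corp.aks.sunlife.com']
--     """
--     parts = dns_name.split('.')
--     patterns = []
--
--     # Generate wildcard patterns for the last 2+ dot levels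
--     for i in range(1, len(parts) - 1):  # Skip the last part (TLD/base)
--         pattern = '*.' + '.'.join(parts[i:])
--         patterns.append(pattern)
--
--     return patterns
--
-- def is_covered_by_wildcard(dns_name: str, existing_hosts: List[str]) -> Tuple[bool, str]:
--     """
--     Check if a DNS name is covered by existing wildcard patterns.
--     Returns: (is_covered, reason)
--     """
--     # Check for exact match
--     if dns_name in existing_hosts:
--         return True, f"Exact match found in gateway hosts"
--
--     # Check for wildcard patterns
--     wildcard_patterns = get_wildcard_patterns(dns_name)
--     for pattern in wildcard_patterns:
--         if pattern in existing_hosts: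
--             return True, f"Covered by wildcard pattern: {pattern}"
--
--     return False, "No matching host or wildcard pattern found"
-- ===== SOURCE B (Python) =====
-- from typing import List, Tuple
--
-- def is_covered_by_wildcard(dns_name: str, existing_hosts: List[str]) -> Tuple[bool, str]:
--     if dns_name in existing_hosts:
--         return True, "Exact match found in gateway hosts"
--     best = None
--     for h in existing_hosts:
--         if h.startswith('*.'):
--             suf = h[2:]
--             if '.' in suf and dns_name.endswith('.' + suf):
--                 if best is None or len(h) > len(best):
--                     best = h
--     if best is not None:
--         return True, f"Covered by wildcard pattern: {best}"
--     return False, "No matching host or wildcard pattern found"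
-- ===== Notes on version B (the rewrite author's own statement) =====
-- stated objective: alternative
-- what changed: A generates every wildcard pattern of the dns name and scans the host list once per pattern; B makes a single pass over the hosts, testing each '*.'-entry directly against the name (suffix at a label boundary with >=2 labels kept and >=1 stripped) and keeping the longest matching pattern, which equals A's first-generated match.
import Mathlib
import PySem

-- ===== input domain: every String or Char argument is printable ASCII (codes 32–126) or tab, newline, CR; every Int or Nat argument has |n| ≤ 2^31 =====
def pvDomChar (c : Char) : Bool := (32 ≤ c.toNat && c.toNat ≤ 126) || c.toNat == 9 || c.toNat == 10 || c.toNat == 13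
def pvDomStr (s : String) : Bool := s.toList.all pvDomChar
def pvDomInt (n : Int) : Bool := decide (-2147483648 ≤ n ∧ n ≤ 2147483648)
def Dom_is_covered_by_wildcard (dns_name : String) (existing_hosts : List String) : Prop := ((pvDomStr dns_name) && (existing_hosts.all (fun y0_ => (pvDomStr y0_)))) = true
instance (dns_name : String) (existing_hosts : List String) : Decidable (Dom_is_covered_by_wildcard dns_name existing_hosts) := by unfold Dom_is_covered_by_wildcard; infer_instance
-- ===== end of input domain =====

-- B replaces A's generate-all-wildcard-patterns-then-scan by a single pass over the
-- hosts that tests each wildcard entry directly against the name (objective: alternative).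

-- ===== PORT A =====

-- helper of A: get_wildcard_patterns (on code points)
def get_wildcard_patterns (dns : List Char) : List (List Char) :=
  let parts := PySem.Chars.splitOn dns ['.']
  (PySem.List.pyRange 1 ((parts.length : Int) - 1) 1).foldl
    (fun patterns i =>
      patterns ++ [['*', '.'] ++ PySem.Chars.join ['.'] (PySem.List.slice parts (some i) none)]) []

-- A's 'for pattern in wildcard_patterns: if pattern in existing_hosts: return …' loop
def pvFirstIn (patterns hosts : List (List Char)) : Option (List Char) :=
  match patterns with
  | [] => none
  | p :: rest => if p ∈ hosts then some p else pvFirstIn rest hosts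

def is_covered_by_wildcard (dns_name : String) (existing_hosts : List String) : Bool × String :=
  let hosts := existing_hosts.map String.toList
  if dns_name.toList ∈ hosts then
    (true, "Exact match found in gateway hosts")
  else
    match pvFirstIn (get_wildcard_patterns dns_name.toList) hosts with
    | some p => (true, "Covered by wildcard pattern: " ++ String.ofList p)
    | none => (false, "No matching host or wildcard pattern found")

-- ===== PORT B =====

-- body of B's single loop over existing_hosts
def pvBestStep (dns : List Char) (best : Option (List Char)) (h : List Char) : Option (List Char) :=
  if PySem.Chars.startswith h ['*', '.'] then
    let suf := PySem.List.slice h (some 2) none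
    if PySem.Chars.isIn ['.'] suf && PySem.Chars.endswith dns ('.' :: suf) then
      match best with
      | none => some h
      | some b => if b.length < h.length then some h else some b
    else best
  else best

def is_covered_by_wildcard_alt (dns_name : String) (existing_hosts : List String) : Bool × String :=
  let hosts := existing_hosts.map String.toList
  if dns_name.toList ∈ hosts then
    (true, "Exact match found in gateway hosts")
  else
    match hosts.foldl (pvBestStep dns_name.toList) none with
    | some b => (true, "Covered by wildcard pattern: " ++ String.ofList b)
    | none => (false, "No matching host or wildcard pattern found")

-- ===== PRECONDITION & SPEC =====
def Spec_is_covered_by_wildcard (dns_name : String) (existing_hosts : List String) (out : Bool × String) : Prop := out = is_covered_by_wildcard_alt dns_name existing_hosts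
instance (dns_name : String) (existing_hosts : List String) (out : Bool × String) : Decidable (Spec_is_covered_by_wildcard dns_name existing_hosts out) := by unfold Spec_is_covered_by_wildcard; infer_instance

-- ===== CLAIM (what is proved, stated in full; the proofs are below) =====
def Claim_equal_is_covered_by_wildcard : Prop := ∀ (dns_name : String) (existing_hosts : List String), Dom_is_covered_by_wildcard dns_name existing_hosts → Spec_is_covered_by_wildcard dns_name existing_hosts (is_covered_by_wildcard dns_name existing_hosts)

-- ===== LEMMAS AND PROOFS =====

def pvSplit (c : Char) (pre l : List Char) : List (List Char) :=
  match l with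
  | [] => [pre]
  | x :: xs => if x = c then pre :: pvSplit c [] xs else pvSplit c (pre ++ [x]) xs

lemma pvSplit_ne_nil (c : Char) (pre l : List Char) : pvSplit c pre l ≠ [] := by
  induction l generalizing pre with
  | nil => simp [pvSplit]
  | cons x xs ih =>
    by_cases hx : x = c
    · simp [pvSplit, hx]
    · simp [pvSplit, hx]
      apply ih

lemma pvSplit_cons_self (c : Char) (pre xs : List Char) :
    pvSplit c pre (c :: xs) = pre :: pvSplit c [] xs := by simp [pvSplit]

lemma pvSplit_cons_ne (c x : Char) (hx : x ≠ c) (pre xs : List Char) :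
    pvSplit c pre (x :: xs) = pvSplit c (pre ++ [x]) xs := by simp [pvSplit, hx]

lemma pvSplit_join (c : Char) : ∀ (l pre : List Char),
    List.intercalate [c] (pvSplit c pre l) = pre ++ l := by
  intro l
  induction l with
  | nil => intro pre; simp [pvSplit, List.intercalate]
  | cons x xs ih =>
    intro pre
    by_cases hx : x = c
    · subst hx
      rw [pvSplit_cons_self]
      obtain ⟨q, rest, hq⟩ : ∃ q rest, pvSplit x [] xs = q :: rest := by
        cases h : pvSplit x [] xs with
        | nil => exact absurd h (pvSplit_ne_nil x [] xs)
        | cons q rest => exact ⟨q, rest, rfl⟩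
      rw [hq]
      have hj := PySem.Chars.join_cons_cons [x] pre q rest
      simp only [PySem.Chars.join] at hj
      rw [hj, ← hq, ih []]
      simp
    · rw [pvSplit_cons_ne c x hx, ih (pre ++ [x])]
      simp

lemma pvSplit_nodot (c : Char) : ∀ (l pre : List Char), c ∉ pre →
    ∀ p ∈ pvSplit c pre l, c ∉ p := by
  intro l
  induction l with
  | nil => intro pre hpre p hp; simp [pvSplit] at hp; subst hp; exact hpre
  | cons x xs ih =>
    intro pre hpre p hp
    by_cases hx : x = c
    · subst hx
      rw [pvSplit_cons_self] at hp
      rcases List.mem_cons.mp hp with rfl | hp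
      · exact hpre
      · exact ih [] (by simp) p hp
    · rw [pvSplit_cons_ne c x hx] at hp
      exact ih (pre ++ [x]) (by simp [hpre]; exact fun h => hx h.symm) p hp

lemma join_drop_lt (ps : List (List Char)) (i : Nat) (hi : i + 1 < ps.length) :
    (List.intercalate ['.'] (ps.drop (i+1))).length < (List.intercalate ['.'] (ps.drop i)).length := by
  conv_rhs => rw [List.drop_eq_getElem_cons (show i < ps.length by omega)]
  cases h : ps.drop (i+1) with
  | nil => exact absurd (List.drop_eq_nil_iff.mp h) (by omega)
  | cons q rest =>
    have hj := PySem.Chars.join_cons_cons ['.'] ps[i] q rest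
    simp only [PySem.Chars.join] at hj
    rw [hj]
    simp
    omega

lemma join_drop_mono (ps : List (List Char)) (k j : Nat) (hkj : k ≤ j) :
    (List.intercalate ['.'] (ps.drop j)).length ≤ (List.intercalate ['.'] (ps.drop k)).length := by
  induction j, hkj using Nat.le_induction with
  | base => exact le_rfl
  | succ n hn ih =>
    refine le_trans ?_ ih
    by_cases hlt : n < ps.length
    · by_cases hlt1 : n + 1 < ps.length
      · exact le_of_lt (join_drop_lt ps n hlt1)
      · rw [List.drop_eq_nil_of_le (by omega)]
        simp [List.intercalate]
    · rw [List.drop_eq_nil_of_le (by omega), List.drop_eq_nil_of_le (by omega)]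

lemma suffix_append_cases {l p q : List Char} (h : l <:+ p ++ q) :
    l <:+ q ∨ ∃ t, t <:+ p ∧ t ≠ [] ∧ l = t ++ q := by
  rcases h with ⟨u, hu⟩
  by_cases hl : l.length ≤ q.length
  · left
    have := List.suffix_iff_eq_drop.mp ⟨u, hu⟩
    rw [this]
    have hlen : (p ++ q).length - l.length = p.length + (q.length - l.length) := by
      simp; omega
    rw [hlen, List.drop_append, List.drop_eq_nil_of_le (by omega)]
    simp
    exact List.drop_suffix _ _
  · right
    refine ⟨p.drop ((p ++ q).length - l.length), List.drop_suffix _ _, ?_, ?_⟩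
    · intro hnil
      have h2 := List.drop_eq_nil_iff.mp hnil
      have h3 := congrArg List.length hu
      simp at h3
      rw [List.length_append] at h2
      omega
    · have := List.suffix_iff_eq_drop.mp ⟨u, hu⟩
      rw [this]
      rw [List.drop_append_of_le_length (by simp; omega)]
      congr 1
      simp
      omega

lemma dot_mem_join (qs : List (List Char)) (hnd : ∀ p ∈ qs, '.' ∉ p) :
    '.' ∈ List.intercalate ['.'] qs ↔ 2 ≤ qs.length := by
  match qs with
  | [] => simp [List.intercalate]
  | [p] => simp [List.intercalate]; exact hnd p (by simp)
  | p :: q :: rest =>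
    have hj := PySem.Chars.join_cons_cons ['.'] p q rest
    simp only [PySem.Chars.join] at hj
    rw [hj]
    simp

lemma suffix_join_iff (ps : List (List Char)) (hnd : ∀ p ∈ ps, '.' ∉ p) (suf : List Char) :
    ('.' :: suf) <:+ List.intercalate ['.'] ps ↔
      ∃ i : Nat, 1 ≤ i ∧ i < ps.length ∧ suf = List.intercalate ['.'] (ps.drop i) := by
  induction ps generalizing suf with
  | nil => simp [List.intercalate]
  | cons p ps' ih =>
    match ps' with
    | [] =>
      simp only [List.intercalate, List.intersperse_single, List.flatten]
      constructor
      · intro h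
        have hmem : ('.' : Char) ∈ p := by
          have h2 := h.subset (show ('.' : Char) ∈ '.' :: suf by simp)
          simpa using h2
        exact absurd hmem (hnd p (by simp))
      · rintro ⟨i, h1, h2, -⟩
        simp at h2
        omega
    | q :: rest =>
      have hj := PySem.Chars.join_cons_cons ['.'] p q rest
      simp only [PySem.Chars.join] at hj
      have hnd' : ∀ x ∈ q :: rest, '.' ∉ x := fun x hx => hnd x (by simp [hx])
      constructor
      · intro h
        rw [hj, List.append_assoc] at h
        rcases suffix_append_cases h with h1 | ⟨t, ht, htne, hteq⟩
        · simp only [List.singleton_append] at h1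
          rcases List.suffix_cons_iff.mp h1 with heq | h2
          · exact ⟨1, le_rfl, by simp, by simpa using (List.cons_injective.eq_iff.mp heq : suf = _)⟩
          · rcases (ih hnd' suf).mp h2 with ⟨i, hi1, hi2, hi3⟩
            exact ⟨i + 1, by omega, by simp only [List.length_cons] at hi2 ⊢; omega, by simpa using hi3⟩
        · exfalso
          match t, htne with
          | c :: t', _ =>
            have : c = '.' := by
              have := congrArg (fun l => l.head?) hteq
              simpa using this.symm
            subst this
            exact hnd p (by simp) (ht.subset (by simp))
      · rintro ⟨i, hi1, hi2, hi3⟩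
        rw [hj, List.append_assoc]
        match i, hi1 with
        | 1, _ =>
          simp at hi3
          subst hi3
          simp only [List.singleton_append]
          exact (List.suffix_append _ _)
        | (j+2), _ =>
          have : ('.' :: suf) <:+ List.intercalate ['.'] (q :: rest) := by
            refine (ih hnd' suf).mpr ⟨j + 1, by omega, by simp at hi2 ⊢; omega, ?_⟩
            simpa using hi3
          exact this.trans ((List.suffix_cons '.' _).trans (List.suffix_append _ _))

lemma pvSplit_go (c : Char) : ∀ (fuel : Nat) (l cur : List Char) (acc : List (List Char)),
    l.length < fuel →
    PySem.Chars.splitOn.go [c] fuel l cur acc = acc.reverse ++ pvSplit c cur.reverse l := by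
  intro fuel
  induction fuel with
  | zero => intro l cur acc h; omega
  | succ n ih =>
    intro l cur acc h
    match l with
    | [] => simp [PySem.Chars.splitOn.go, pvSplit]
    | x :: xs =>
      rw [PySem.Chars.splitOn.go]
      by_cases hx : x = c
      · subst hx
        have hp : [x].isPrefixOf (x :: xs) = true := by simp [List.isPrefixOf]
        simp only [hp, if_pos]
        rw [ih _ _ _ (by simp at h ⊢; omega)]
        simp [pvSplit]
      · have hp : [c].isPrefixOf (x :: xs) = false := by
          simp [List.isPrefixOf]; exact fun hc => (hx hc.symm).elim
        simp only [hp]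
        rw [if_neg (by simp)]
        rw [ih _ _ _ (by simp at h ⊢; omega)]
        simp [pvSplit, hx]

lemma splitOn_eq_pvSplit (l : List Char) :
    PySem.Chars.splitOn l ['.'] = pvSplit '.' [] l := by
  have := pvSplit_go '.' (l.length + 1) l [] [] (by omega)
  simpa [PySem.Chars.splitOn] using this

def pvGood (dns h : List Char) : Bool :=
  PySem.Chars.startswith h ['*', '.'] &&
    (PySem.Chars.isIn ['.'] (PySem.List.slice h (some 2) none) &&
     PySem.Chars.endswith dns ('.' :: PySem.List.slice h (some 2) none))

lemma pvBestStep_eq (dns : List Char) (best : Option (List Char)) (h : List Char) :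
    pvBestStep dns best h =
      if pvGood dns h then
        (match best with
         | none => some h
         | some b => if b.length < h.length then some h else some b)
      else best := by
  by_cases h1 : PySem.Chars.startswith h ['*', '.'] <;>
    by_cases h2 : PySem.Chars.isIn ['.'] (PySem.List.slice h (some 2) none) &&
      PySem.Chars.endswith dns ('.' :: PySem.List.slice h (some 2) none) <;>
    simp [pvBestStep, pvGood, h1, h2]

lemma patterns_eq (dns : List Char) :
    get_wildcard_patterns dns =
      (List.range ((pvSplit '.' [] dns).length - 2)).map
        (fun k => '*' :: '.' :: List.intercalate ['.'] ((pvSplit '.' [] dns).drop (k + 1))) := by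
  unfold get_wildcard_patterns
  rw [splitOn_eq_pvSplit]
  set parts := pvSplit '.' [] dns with hp
  rw [PySem.List.foldl_append_singleton_eq_map, PySem.List.pyRange_one, List.map_map]
  have hlen : ((parts.length : Int) - 1 - 1).toNat = parts.length - 2 := by omega
  rw [hlen]
  apply List.map_congr_left
  intro k hk
  simp only [Function.comp_apply]
  rw [PySem.List.slice_from parts (by omega : (0:Int) ≤ 1 + (k:Int))]
  have : ((1 : Int) + (k : Int)).toNat = k + 1 := by omega
  rw [this]
  simp [PySem.Chars.join]

lemma slice_two (h : List Char) : PySem.List.slice h (some 2) none = h.drop 2 := by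
  rw [PySem.List.slice_from h (by omega : (0:Int) ≤ 2)]
  rfl

lemma good_iff_mem (dns h : List Char) :
    pvGood dns h = true ↔ h ∈ get_wildcard_patterns dns := by
  have hjoin : List.intercalate ['.'] (pvSplit '.' [] dns) = dns := pvSplit_join '.' dns []
  have hnd : ∀ p ∈ pvSplit '.' [] dns, '.' ∉ p := pvSplit_nodot '.' dns [] (by simp)
  rw [patterns_eq]
  constructor
  · intro hg
    simp only [pvGood, Bool.and_eq_true] at hg
    obtain ⟨h1, h2, h3⟩ := hg
    obtain ⟨t, ht⟩ := (PySem.Chars.startswith_iff h ['*', '.']).mp h1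
    rw [slice_two] at h2 h3
    have hdrop : h.drop 2 = t := by rw [← ht]; rfl
    rw [hdrop] at h2 h3
    have hdot : ('.' : Char) ∈ t :=
      (List.singleton_infix_iff _ _).mp ((PySem.Chars.isIn_iff_infix ['.'] t).mp h2)
    have hsuf : ('.' :: t) <:+ List.intercalate ['.'] (pvSplit '.' [] dns) := by
      rw [hjoin]; exact (PySem.Chars.endswith_iff dns ('.' :: t)).mp h3
    obtain ⟨i, hi1, hi2, hi3⟩ := (suffix_join_iff _ hnd t).mp hsuf
    have h2le : 2 ≤ ((pvSplit '.' [] dns).drop i).length := by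
      refine (dot_mem_join _ (fun p hp => hnd p (List.mem_of_mem_drop hp))).mp ?_
      rw [← hi3]; exact hdot
    rw [List.length_drop] at h2le
    refine List.mem_map.mpr ⟨i - 1, List.mem_range.mpr (by omega), ?_⟩
    have hi : i - 1 + 1 = i := by omega
    rw [hi, ← hi3, ← ht]
    rfl
  · intro hm
    obtain ⟨k, hk, rfl⟩ := List.mem_map.mp hm
    rw [List.mem_range] at hk
    simp only [pvGood, Bool.and_eq_true]
    refine ⟨?_, ?_, ?_⟩
    · exact (PySem.Chars.startswith_iff _ _).mpr ⟨_, rfl⟩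
    · rw [slice_two]
      refine (PySem.Chars.isIn_iff_infix _ _).mpr ((List.singleton_infix_iff _ _).mpr ?_)
      refine (dot_mem_join _ (fun p hp => hnd p (List.mem_of_mem_drop hp))).mpr ?_
      rw [List.length_drop]; omega
    · rw [slice_two]
      refine (PySem.Chars.endswith_iff _ _).mpr ?_
      have : ('.' :: List.intercalate ['.'] ((pvSplit '.' [] dns).drop (k+1))) <:+
          List.intercalate ['.'] (pvSplit '.' [] dns) :=
        (suffix_join_iff _ hnd _).mpr ⟨k + 1, by omega, by omega, rfl⟩
      rw [hjoin] at this
      exact this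

lemma good_unique (dns p b : List Char) (hp : pvGood dns p = true) (hb : pvGood dns b = true)
    (hl : p.length = b.length) : p = b := by
  simp only [pvGood, Bool.and_eq_true, slice_two] at hp hb
  obtain ⟨hp1, -, hp3⟩ := hp
  obtain ⟨hb1, -, hb3⟩ := hb
  obtain ⟨tp, htp⟩ := (PySem.Chars.startswith_iff p ['*', '.']).mp hp1
  obtain ⟨tb, htb⟩ := (PySem.Chars.startswith_iff b ['*', '.']).mp hb1
  have hdp : p.drop 2 = tp := by rw [← htp]; rfl
  have hdb : b.drop 2 = tb := by rw [← htb]; rfl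
  rw [hdp] at hp3; rw [hdb] at hb3
  have hsp := (PySem.Chars.endswith_iff dns ('.' :: tp)).mp hp3
  have hsb := (PySem.Chars.endswith_iff dns ('.' :: tb)).mp hb3
  have hlen : ('.' :: tp).length = ('.' :: tb).length := by
    have e1 := congrArg List.length htp
    have e2 := congrArg List.length htb
    simp at e1 e2 ⊢
    omega
  have heq : ('.' :: tp) = ('.' :: tb) := by
    rw [List.suffix_iff_eq_drop.mp hsp, List.suffix_iff_eq_drop.mp hsb, hlen]
  rw [← htp, ← htb]
  simp at heq
  rw [heq]

lemma patterns_pairwise (dns : List Char) :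
    (get_wildcard_patterns dns).Pairwise (fun a b => b.length < a.length) := by
  rw [patterns_eq, List.pairwise_map, List.pairwise_iff_getElem]
  intro i j hi hj hij
  simp only [List.getElem_range] at *
  rw [List.length_range] at hi hj
  simp only [List.length_cons]
  have h1 : (List.intercalate ['.'] ((pvSplit '.' [] dns).drop (j+1))).length ≤
      (List.intercalate ['.'] ((pvSplit '.' [] dns).drop (i+1+1))).length :=
    join_drop_mono _ _ _ (by omega)
  have h2 : (List.intercalate ['.'] ((pvSplit '.' [] dns).drop (i+1+1))).length <
      (List.intercalate ['.'] ((pvSplit '.' [] dns).drop (i+1))).length :=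
    join_drop_lt _ _ (by omega)
  omega

lemma pvFirstIn_none (patterns hosts : List (List Char)) :
    pvFirstIn patterns hosts = none ↔ ∀ q ∈ patterns, q ∉ hosts := by
  induction patterns with
  | nil => simp [pvFirstIn]
  | cons p rest ih =>
    by_cases hp : p ∈ hosts
    · simp [pvFirstIn, hp]
    · simp [pvFirstIn, hp, ih]

lemma pvFirstIn_some (patterns hosts : List (List Char)) (p : List Char)
    (hpw : patterns.Pairwise (fun a b => b.length < a.length))
    (h : pvFirstIn patterns hosts = some p) :
    p ∈ patterns ∧ p ∈ hosts ∧ ∀ q ∈ patterns, q ∈ hosts → q.length ≤ p.length := by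
  induction patterns with
  | nil => simp [pvFirstIn] at h
  | cons a rest ih =>
    rcases List.pairwise_cons.mp hpw with ⟨ha, hrest⟩
    by_cases hmem : a ∈ hosts
    · simp only [pvFirstIn, if_pos hmem, Option.some.injEq] at h
      subst h
      refine ⟨by simp, hmem, ?_⟩
      intro q hq hqh
      rcases List.mem_cons.mp hq with rfl | hq
      · exact le_rfl
      · exact le_of_lt (ha q hq)
    · simp only [pvFirstIn, if_neg hmem] at h
      obtain ⟨h1, h2, h3⟩ := ih hrest h
      refine ⟨by simp [h1], h2, ?_⟩
      intro q hq hqh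
      rcases List.mem_cons.mp hq with rfl | hq
      · exact absurd hqh hmem
      · exact h3 q hq hqh

lemma foldl_best (dns : List Char) : ∀ (hosts : List (List Char)) (acc : Option (List Char)),
    (∀ x, acc = some x → pvGood dns x = true) →
    (match hosts.foldl (pvBestStep dns) acc with
     | none => acc = none ∧ ∀ h ∈ hosts, pvGood dns h = false
     | some b => pvGood dns b = true ∧ (acc = some b ∨ b ∈ hosts) ∧
         (∀ q ∈ hosts, pvGood dns q = true → q.length ≤ b.length) ∧
         (∀ a, acc = some a → a.length ≤ b.length)) := by
  intro hosts
  induction hosts with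
  | nil =>
    intro acc hacc
    match acc with
    | none => exact ⟨rfl, by simp⟩
    | some a => exact ⟨hacc a rfl, Or.inl rfl, by simp, by rintro x ⟨rfl⟩; exact le_rfl⟩
  | cons h hs ih =>
    intro acc hacc
    rw [List.foldl_cons]
    by_cases hg : pvGood dns h = true
    · have hstep : ∃ x, pvBestStep dns acc h = some x ∧ pvGood dns x = true ∧
          h.length ≤ x.length ∧ (∀ a, acc = some a → a.length ≤ x.length) ∧
          (acc = some x ∨ x = h) := by
        rw [pvBestStep_eq, if_pos hg]
        match acc with
        | none => exact ⟨h, rfl, hg, le_rfl, by simp, Or.inr rfl⟩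
        | some a =>
          by_cases hlt : a.length < h.length
          · exact ⟨h, by simp [hlt], hg, le_rfl, by rintro x ⟨rfl⟩; omega, Or.inr rfl⟩
          · exact ⟨a, by simp [hlt], hacc a rfl, by omega, by rintro x ⟨rfl⟩; exact le_rfl,
              Or.inl rfl⟩
      obtain ⟨x, hx, hxg, hhx, hax, hor⟩ := hstep
      rw [hx]
      have := ih (some x) (by rintro y ⟨rfl⟩; exact hxg)
      rw [hx] at *
      match hres : hs.foldl (pvBestStep dns) (some x) with
      | none =>
        rw [hres] at this
        exact absurd this.1 (by simp)
      | some b =>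
        rw [hres] at this
        obtain ⟨hbg, hbor, hbmax, hble⟩ := this
        refine ⟨hbg, ?_, ?_, ?_⟩
        · rcases hbor with hxb | hb
          · rcases hor with hacc' | rfl
            · exact Or.inl (by rw [hacc']; exact hxb)
            · simp at hxb; subst hxb; exact Or.inr (by simp)
          · exact Or.inr (by simp [hb])
        · intro q hq hqg
          rcases List.mem_cons.mp hq with rfl | hq
          · exact le_trans hhx (hble x rfl)
          · exact hbmax q hq hqg
        · intro a ha
          exact le_trans (hax a ha) (hble x rfl)
    · have hstep : pvBestStep dns acc h = acc := by
        rw [pvBestStep_eq, if_neg (by simp [hg])]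
      rw [hstep]
      have := ih acc hacc
      match hres : hs.foldl (pvBestStep dns) acc with
      | none =>
        rw [hres] at this
        exact ⟨this.1, by
          intro q hq
          rcases List.mem_cons.mp hq with rfl | hq
          · simpa using hg
          · exact this.2 q hq⟩
      | some b =>
        rw [hres] at this
        obtain ⟨hbg, hbor, hbmax, hble⟩ := this
        refine ⟨hbg, by rcases hbor with h1 | h1; exact Or.inl h1; exact Or.inr (by simp [h1]), ?_, hble⟩
        intro q hq hqg
        rcases List.mem_cons.mp hq with rfl | hq
        · exact absurd hqg (by simp [hg])
        · exact hbmax q hq hqg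

lemma main_match (dns : List Char) (hosts : List (List Char)) :
    pvFirstIn (get_wildcard_patterns dns) hosts = hosts.foldl (pvBestStep dns) none := by
  have hfold := foldl_best dns hosts none (by simp)
  match hres : hosts.foldl (pvBestStep dns) none with
  | none =>
    rw [hres] at hfold
    rw [pvFirstIn_none]
    intro q hq hqh
    have := hfold.2 q hqh
    rw [(good_iff_mem dns q).mpr hq] at this
    exact absurd this (by simp)
  | some b =>
    rw [hres] at hfold
    obtain ⟨hbg, hbor, hbmax, -⟩ := hfold
    have hbh : b ∈ hosts := by
      rcases hbor with h1 | h1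
      · exact absurd h1 (by simp)
      · exact h1
    have hbp : b ∈ get_wildcard_patterns dns := (good_iff_mem dns b).mp hbg
    match hfst : pvFirstIn (get_wildcard_patterns dns) hosts with
    | none => exact absurd hbh ((pvFirstIn_none _ _).mp hfst b hbp)
    | some p =>
      obtain ⟨hp1, hp2, hp3⟩ := pvFirstIn_some _ hosts p (patterns_pairwise dns) hfst
      have hgp : pvGood dns p = true := (good_iff_mem dns p).mpr hp1
      have hle1 : p.length ≤ b.length := hbmax p hp2 hgp
      have hle2 : b.length ≤ p.length := hp3 b hbp hbh
      rw [good_unique dns p b hgp hbg (by omega)]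

-- ===== VERDICT (by name: the statement is the Claim_ definition above) =====
theorem is_covered_by_wildcard_spec : Claim_equal_is_covered_by_wildcard := by
  intro dns_name existing_hosts _
  unfold Spec_is_covered_by_wildcard is_covered_by_wildcard is_covered_by_wildcard_alt
  simp only [main_match]
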